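-- pv_equiv track=rewrite | github.com/Apjakal-IT-Solutions/kgk | kgk_customisations/stone_management/doctype/stone_breaking_report/stone_breaking_report.py | _next_suffix
-- ===== SOURCE A (Python) =====
-- def _next_suffix(existing_suffixes):
-- 	"""Given a set of existing letter suffixes (e.g. {'b','c'}), return the next one."""
-- 	# Generate a, b, c, …, z, aa, ab, …
-- 	idx = 0
-- 	while True:
-- 		# Convert idx to base-26 letter string (0→a, 1→b, …, 25→z, 26→aa, …)
-- 		n = idx
-- 		suffix = ""
-- 		while True:
-- 			suffix = chr(ord('a') + (n % 26)) + suffix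
-- 			n = n // 26 - 1
-- 			if n < 0:
-- 				break
-- 		# First doc has no suffix; second starts at 'b' (idx=1)
-- 		if idx >= 1 and suffix not in existing_suffixes:
-- 			return suffix
-- 		idx += 1
-- ===== SOURCE B (Python) =====
-- def _next_suffix(existing_suffixes):
--     """Given a set of existing letter suffixes (e.g. {'b','c'}), return the next one."""
--     # Decode each well-formed suffix (nonempty, all lowercase ascii letters) to its
--     # bijective base-26 value (a=1, ..., z=26, aa=27, ...); malformed entries can
--     # never equal an encoded candidate, so they are skipped.
--     used = set()
--     for s in existing_suffixes:
--         if s and all('a' <= c <= 'z' for c in s):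
--             v = 0
--             for c in s:
--                 v = v * 26 + (ord(c) - 96)
--             used.add(v)
--     # Sort the used values once and sweep: each time the sweep meets the current
--     # candidate, the candidate moves up by one; after the sweep v is the smallest
--     # value >= 2 ('b') that is not used.  No per-candidate membership test.
--     v = 2
--     for u in sorted(used):
--         if u == v:
--             v += 1
--     # Bijective base-26 encoding of v, recursively (most significant part first).
--     def enc(n):
--         return '' if n == 0 else enc((n - 1) // 26) + chr(97 + (n - 1) % 26)
--     return enc(v)
-- ===== Notes on version B (the rewrite author's own statement) =====
-- stated objective: alternative
-- what changed: Replaces A's candidate-by-candidate encode-and-membership-test loop with a staged pipeline: one pass decodes each well-formed suffix to its bijective base-26 value, the values are sorted once, a single sweep over the sorted values advances the candidate past every value it meets (so the least unused value >= 2 falls out with no membership tests), and one recursive encode produces the answer.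
import Mathlib
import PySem

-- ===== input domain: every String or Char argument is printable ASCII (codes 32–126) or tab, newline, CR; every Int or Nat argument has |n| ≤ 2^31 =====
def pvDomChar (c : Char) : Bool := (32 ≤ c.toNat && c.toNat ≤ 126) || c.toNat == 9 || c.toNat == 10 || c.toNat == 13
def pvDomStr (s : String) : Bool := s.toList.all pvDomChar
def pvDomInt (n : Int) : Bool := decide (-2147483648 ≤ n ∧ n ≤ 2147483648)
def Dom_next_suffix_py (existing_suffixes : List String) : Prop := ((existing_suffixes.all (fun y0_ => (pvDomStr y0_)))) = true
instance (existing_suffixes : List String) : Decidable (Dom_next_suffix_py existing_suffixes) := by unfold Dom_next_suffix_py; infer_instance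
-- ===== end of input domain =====

-- B replaces A's candidate-by-candidate encode-and-test with one decode pass into an
-- integer set, a single sort-and-sweep over the sorted values, and one recursive encode
-- (objective: alternative).

-- ===== PORT A =====
-- inner while: suffix = chr(97 + n%26) + suffix; n = n//26 - 1; break if n < 0  (n ≥ 0 throughout, so n//26-1 < 0 ↔ n < 26)
def pvEncA (n : Nat) (suffix : List Char) : List Char :=
  if n < 26 then Char.ofNat (97 + n % 26) :: suffix
  else pvEncA (n / 26 - 1) (Char.ofNat (97 + n % 26) :: suffix)
termination_by n
decreasing_by have := Nat.div_le_self n 26; omega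

-- outer while True: fuel = length + 2 suffices (proved below; the out-of-fuel value is unreachable)
def pvLoopA (fuel idx : Nat) (xs : List String) : String :=
  match fuel with
  | 0 => ""
  | fuel + 1 =>
    let suffix := String.ofList (pvEncA idx [])
    if idx ≥ 1 ∧ suffix ∉ xs then suffix else pvLoopA fuel (idx + 1) xs

def next_suffix_py (existing_suffixes : List String) : String :=
  pvLoopA (existing_suffixes.length + 2) 0 existing_suffixes

-- ===== PORT B =====
def pvDecStep (v : Nat) (c : Char) : Nat := v * 26 + (c.toNat - 96)

-- `if s and all('a' <= c <= 'z' for c in s)`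
def pvValidB (s : String) : Bool := !s.toList.isEmpty && s.toList.all (fun c => 'a' ≤ c && c ≤ 'z')

def pvUsed (xs : List String) : PySem.Set Nat :=
  xs.foldl (fun u s => if pvValidB s then PySem.Set.add u (s.toList.foldl pvDecStep 0) else u) []

-- `def enc(n): return '' if n == 0 else enc((n-1)//26) + chr(97 + (n-1)%26)`
def pvEnc2 (n : Nat) : List Char :=
  if n = 0 then [] else pvEnc2 ((n - 1) / 26) ++ [Char.ofNat (97 + (n - 1) % 26)]
termination_by n
decreasing_by have := Nat.div_le_self (n - 1) 26; omega

-- v = 2; for u in sorted(used): if u == v: v += 1; return enc(v)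
def next_suffix_py_alt (existing_suffixes : List String) : String :=
  let used := pvUsed existing_suffixes
  let v := (PySem.List.sorted used (fun x => x) false).foldl
    (fun v u => if u = v then v + 1 else v) 2
  String.ofList (pvEnc2 v)

-- ===== PRECONDITION & SPEC =====
def Spec_next_suffix_py (existing_suffixes : List String) (out : String) : Prop := out = next_suffix_py_alt existing_suffixes
instance (existing_suffixes : List String) (out : String) : Decidable (Spec_next_suffix_py existing_suffixes out) := by unfold Spec_next_suffix_py; infer_instance

-- ===== CLAIM (what is proved, stated in full; the proofs are below) =====
def Claim_equal_next_suffix_py : Prop := ∀ (existing_suffixes : List String), Dom_next_suffix_py existing_suffixes → Spec_next_suffix_py existing_suffixes (next_suffix_py existing_suffixes)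

-- ===== LEMMAS AND PROOFS =====

-- canonical bijective base-26 encoding of v ≥ 1 (a=1, …, z=26, aa=27, …)
def pvE (v : Nat) : List Char :=
  if v ≤ 26 then [Char.ofNat (96 + v)] else pvE ((v - 1) / 26) ++ [Char.ofNat (97 + (v - 1) % 26)]
termination_by v
decreasing_by have := Nat.div_le_self (v - 1) 26; omega

def pvDec (cs : List Char) : Nat := cs.foldl pvDecStep 0

def pvValid (cs : List Char) : Prop := cs ≠ [] ∧ ∀ c ∈ cs, 97 ≤ c.toNat ∧ c.toNat ≤ 122

lemma pvEncA_eq (n : Nat) : ∀ acc, pvEncA n acc = pvE (n + 1) ++ acc := by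
  induction n using Nat.strong_induction_on with
  | _ n ih =>
    intro acc
    rw [pvEncA]
    by_cases h : n < 26
    · have hm : 97 + n % 26 = 96 + (n + 1) := by
        have := Nat.mod_eq_of_lt h; omega
      rw [if_pos h, hm]
      conv_rhs => rw [pvE]
      rw [if_pos (by omega)]
      rfl
    · have hd : n / 26 ≥ 1 := Nat.le_div_iff_mul_le (by norm_num) |>.mpr (by omega)
      have hlt : n / 26 - 1 < n := by have := Nat.div_le_self n 26; omega
      rw [if_neg h, ih _ hlt]
      have h1 : n / 26 - 1 + 1 = n / 26 := by omega
      rw [h1]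
      conv_rhs => rw [pvE]
      rw [if_neg (by omega), Nat.add_sub_cancel]
      simp

lemma pvEnc2_eq (v : Nat) (hv : 1 ≤ v) : pvEnc2 v = pvE v := by
  induction v using Nat.strong_induction_on with
  | _ v ih =>
    rw [pvEnc2, if_neg (by omega)]
    by_cases h : v ≤ 26
    · have h0 : (v - 1) / 26 = 0 := Nat.div_eq_of_lt (by omega)
      rw [h0, pvEnc2, if_pos rfl, pvE, if_pos h]
      have hm : 97 + (v - 1) % 26 = 96 + v := by
        have : (v - 1) % 26 = v - 1 := Nat.mod_eq_of_lt (by omega)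
        omega
      simp [hm]
    · have hd : 1 ≤ (v - 1) / 26 := Nat.le_div_iff_mul_le (by norm_num) |>.mpr (by omega)
      have hlt : (v - 1) / 26 < v := by have := Nat.div_le_self (v - 1) 26; omega
      rw [ih _ hlt hd]
      conv_rhs => rw [pvE, if_neg h]

lemma pvDec_append (cs : List Char) (c : Char) :
    pvDec (cs ++ [c]) = pvDec cs * 26 + (c.toNat - 96) := by
  simp [pvDec, pvDecStep]

lemma pvChar_toNat_ofNat {n : Nat} (h1 : 97 ≤ n) (h2 : n ≤ 123) : (Char.ofNat n).toNat = n := by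
  have : n.isValidChar := Or.inl (by omega)
  simp [Char.toNat, Char.ofNat, Char.ofNatAux, this]

lemma pvDec_E (v : Nat) (hv : 1 ≤ v) : pvDec (pvE v) = v := by
  induction v using Nat.strong_induction_on with
  | _ v ih =>
    rw [pvE]
    by_cases h : v ≤ 26
    · rw [if_pos h]
      have hc := pvChar_toNat_ofNat (n := 96 + v) (by omega) (by omega)
      simp [pvDec, pvDecStep, hc]
    · have hd : 1 ≤ (v - 1) / 26 := Nat.le_div_iff_mul_le (by norm_num) |>.mpr (by omega)
      have hlt : (v - 1) / 26 < v := by have := Nat.div_le_self (v - 1) 26; omega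
      rw [if_neg h, pvDec_append, ih _ hlt hd,
        pvChar_toNat_ofNat (by omega) (by have := Nat.mod_lt (v - 1) (y := 26) (by norm_num); omega)]
      have := Nat.div_add_mod (v - 1) 26
      omega

lemma pvE_valid (v : Nat) (hv : 1 ≤ v) : pvValid (pvE v) := by
  induction v using Nat.strong_induction_on with
  | _ v ih =>
    rw [pvE]
    by_cases h : v ≤ 26
    · rw [if_pos h]
      refine ⟨by simp, ?_⟩
      intro c hc
      simp only [List.mem_singleton] at hc
      subst hc
      rw [pvChar_toNat_ofNat (by omega) (by omega)]
      omega
    · have hd : 1 ≤ (v - 1) / 26 := Nat.le_div_iff_mul_le (by norm_num) |>.mpr (by omega)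
      have hlt : (v - 1) / 26 < v := by have := Nat.div_le_self (v - 1) 26; omega
      obtain ⟨hne, hall⟩ := ih _ hlt hd
      rw [if_neg h]
      refine ⟨by simp [hne], ?_⟩
      intro c hc
      rcases List.mem_append.mp hc with h1 | h1
      · exact hall c h1
      · simp only [List.mem_singleton] at h1
        subst h1
        have hm : (v - 1) % 26 < 26 := Nat.mod_lt _ (by norm_num)
        rw [pvChar_toNat_ofNat (by omega) (by omega)]
        omega

lemma pvDec_pos (cs : List Char) (h : pvValid cs) : 1 ≤ pvDec cs := by
  induction cs using List.reverseRecOn with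
  | nil => exact absurd rfl h.1
  | append_singleton cs c ih =>
    rw [pvDec_append]
    have := h.2 c (by simp)
    omega

lemma pvE_dec (cs : List Char) (h : pvValid cs) : pvE (pvDec cs) = cs := by
  induction cs using List.reverseRecOn with
  | nil => exact absurd rfl h.1
  | append_singleton cs c ih =>
    have hc := h.2 c (by simp)
    rw [pvDec_append]
    rcases eq_or_ne cs [] with hnil | hne
    · subst hnil
      simp only [pvDec, List.foldl_nil, Nat.zero_mul, Nat.zero_add]
      rw [pvE, if_pos (by omega)]
      have h96 : 96 + (c.toNat - 96) = c.toNat := by omega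
      rw [h96, Char.ofNat_toNat]
      rfl
    · have hvcs : pvValid cs := ⟨hne, fun x hx => h.2 x (by simp [hx])⟩
      have hw := pvDec_pos cs hvcs
      set w := pvDec cs with hwdef
      have hbig : ¬ (w * 26 + (c.toNat - 96) ≤ 26) := by
        have h1 := hc.1
        omega
      rw [pvE, if_neg hbig]
      have h1 : w * 26 + (c.toNat - 96) - 1 = w * 26 + (c.toNat - 97) := by omega
      have h2 : (w * 26 + (c.toNat - 97)) / 26 = w := by
        rw [Nat.mul_comm, Nat.mul_add_div (by norm_num)]
        have : (c.toNat - 97) / 26 = 0 := Nat.div_eq_of_lt (by omega)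
        omega
      have h3 : (w * 26 + (c.toNat - 97)) % 26 = c.toNat - 97 := by
        rw [Nat.mul_comm, Nat.mul_add_mod]
        exact Nat.mod_eq_of_lt (by omega)
      rw [h1, h2, h3, ih hvcs]
      have h97 : 97 + (c.toNat - 97) = c.toNat := by omega
      rw [h97, Char.ofNat_toNat]

-- membership characterisation of the decoded-value set
lemma pvMem_used_aux (xs : List String) : ∀ (u : PySem.Set Nat) (v : Nat),
    v ∈ xs.foldl (fun u s => if pvValidB s then PySem.Set.add u (s.toList.foldl pvDecStep 0) else u) u ↔
      v ∈ u ∨ ∃ s ∈ xs, pvValidB s = true ∧ pvDec s.toList = v := by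
  induction xs with
  | nil => simp
  | cons s xs ih =>
    intro u v
    simp only [List.foldl_cons]
    rw [ih]
    by_cases hs : pvValidB s = true
    · simp only [hs, if_pos, PySem.Set.mem_add, List.mem_cons]
      constructor
      · rintro (⟨h1 | h1⟩ | ⟨t, ht, hv, hd⟩)
        · exact Or.inl h1
        · exact Or.inr ⟨s, Or.inl rfl, hs, h1.symm⟩
        · exact Or.inr ⟨t, Or.inr ht, hv, hd⟩
      · rintro (h1 | ⟨t, ht | ht, hv, hd⟩)
        · exact Or.inl (Or.inl h1)
        · subst ht; exact Or.inl (Or.inr hd.symm)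
        · exact Or.inr ⟨t, ht, hv, hd⟩
    · simp only [hs, List.mem_cons]
      constructor
      · rintro (h1 | ⟨t, ht, hv, hd⟩)
        · exact Or.inl h1
        · exact Or.inr ⟨t, Or.inr ht, hv, hd⟩
      · rintro (h1 | ⟨t, ht | ht, hv, hd⟩)
        · exact Or.inl h1
        · subst ht; exact absurd hv hs
        · exact Or.inr ⟨t, ht, hv, hd⟩

lemma pvCharRange (c : Char) : (decide ('a' ≤ c) && decide (c ≤ 'z')) = true ↔ 97 ≤ c.toNat ∧ c.toNat ≤ 122 := by
  simp only [Bool.and_eq_true, decide_eq_true_eq, Char.le_def]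
  have ha : ('a' : Char).val.toNat = 97 := rfl
  have hz : ('z' : Char).val.toNat = 122 := rfl
  constructor
  · rintro ⟨h1, h2⟩
    exact ⟨ha ▸ UInt32.le_iff_toNat_le.mp h1, hz ▸ UInt32.le_iff_toNat_le.mp h2⟩
  · rintro ⟨h1, h2⟩
    exact ⟨UInt32.le_iff_toNat_le.mpr (ha ▸ h1), UInt32.le_iff_toNat_le.mpr (hz ▸ h2)⟩

lemma pvValidB_iff (s : String) : pvValidB s = true ↔ pvValid s.toList := by
  simp only [pvValidB, pvValid, Bool.and_eq_true, List.all_eq_true]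
  constructor
  · rintro ⟨h1, h2⟩
    refine ⟨by simpa using h1, fun c hc => ?_⟩
    exact (pvCharRange c).mp (by simpa using h2 c hc)
  · rintro ⟨h1, h2⟩
    refine ⟨by simpa using h1, fun c hc => ?_⟩
    simpa using (pvCharRange c).mpr (h2 c hc)

lemma pvMem_used (xs : List String) (v : Nat) (hv : 1 ≤ v) :
    String.ofList (pvE v) ∈ xs ↔ v ∈ pvUsed xs := by
  rw [pvUsed, pvMem_used_aux]
  simp only [List.not_mem_nil, false_or]
  constructor
  · intro hmem
    refine ⟨String.ofList (pvE v), hmem, ?_, ?_⟩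
    · rw [pvValidB_iff, String.toList_ofList]
      exact pvE_valid v hv
    · show pvDec (String.ofList (pvE v)).toList = v
      rw [String.toList_ofList]
      exact pvDec_E v hv
  · rintro ⟨s, hs, hval, hdec⟩
    have heq : pvE v = s.toList := by
      rw [← hdec]
      exact pvE_dec _ ((pvValidB_iff s).mp hval)
    rw [heq, String.ofList_toList]
    exact hs

-- the Set.add fold keeps the list duplicate-free
lemma pvNodup_add (u : PySem.Set Nat) (x : Nat) (h : u.Nodup) : (PySem.Set.add u x).Nodup := by
  simp only [PySem.Set.add]
  split
  · exact h
  · rename_i hc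
    have hx : x ∉ u := by simpa [PySem.Set.contains] using hc
    exact List.Nodup.append h (List.nodup_singleton x) (List.disjoint_singleton.mpr hx)

lemma pvUsed_nodup (xs : List String) : (pvUsed xs).Nodup := by
  rw [pvUsed]
  suffices h : ∀ u : PySem.Set Nat, u.Nodup →
      (xs.foldl (fun u s => if pvValidB s then PySem.Set.add u (s.toList.foldl pvDecStep 0) else u) u).Nodup by
    exact h [] (List.nodup_nil)
  induction xs with
  | nil => intro u hu; simpa using hu
  | cons s xs ih =>
    intro u hu
    simp only [List.foldl_cons]
    split
    · exact ih _ (pvNodup_add u _ hu)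
    · exact ih u hu

-- the sweep over a strictly increasing list computes the least unused value ≥ the start
lemma pvSweep (l : List Nat) (hl : l.Pairwise (· < ·)) : ∀ v : Nat,
    let r := l.foldl (fun v u => if u = v then v + 1 else v) v
    r ∉ l ∧ v ≤ r ∧ ∀ j, v ≤ j → j < r → j ∈ l := by
  induction l with
  | nil =>
    intro v
    show v ∉ ([] : List Nat) ∧ v ≤ v ∧ ∀ j, v ≤ j → j < v → j ∈ ([] : List Nat)
    exact ⟨by simp, le_refl v, by omega⟩
  | cons u rest ih =>
    intro v
    have hrest : rest.Pairwise (· < ·) := (List.pairwise_cons.mp hl).2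
    have hu : ∀ x ∈ rest, u < x := (List.pairwise_cons.mp hl).1
    simp only [List.foldl_cons]
    by_cases h : u = v
    · rw [if_pos h]
      obtain ⟨h1, h2, h3⟩ := ih hrest (v + 1)
      refine ⟨?_, by omega, ?_⟩
      · intro hc
        rcases List.mem_cons.mp hc with hc | hc
        · omega
        · exact h1 hc
      · intro j hj1 hj2
        rcases Nat.eq_or_lt_of_le hj1 with hj | hj
        · exact List.mem_cons.mpr (Or.inl (by omega))
        · exact List.mem_cons.mpr (Or.inr (h3 j (by omega) hj2))
    · rw [if_neg h]
      obtain ⟨h1, h2, h3⟩ := ih hrest v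
      by_cases hlt : u < v
      · refine ⟨?_, h2, fun j hj1 hj2 => List.mem_cons.mpr (Or.inr (h3 j hj1 hj2))⟩
        intro hc
        rcases List.mem_cons.mp hc with hc | hc
        · omega
        · exact h1 hc
      · -- u > v: nothing in rest is ≤ u, so v itself is unused and the fold keeps v
        have hgt : v < u := by omega
        have hr : rest.foldl (fun v u => if u = v then v + 1 else v) v = v := by
          by_contra hne
          have : v < rest.foldl (fun v u => if u = v then v + 1 else v) v := by omega
          have := h3 v (le_refl v) this
          have := hu v this
          omega
        rw [hr] at h1 h2 h3 ⊢
        refine ⟨?_, le_refl v, by omega⟩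
        intro hc
        rcases List.mem_cons.mp hc with hc | hc
        · omega
        · have := hu v hc; omega

lemma pvLoopA_eq (xs : List String) : ∀ fuel idx k, k < fuel →
    (idx + k ≥ 1 ∧ String.ofList (pvEncA (idx + k) []) ∉ xs) →
    (∀ j < k, ¬ (idx + j ≥ 1 ∧ String.ofList (pvEncA (idx + j) []) ∉ xs)) →
    pvLoopA fuel idx xs = String.ofList (pvEncA (idx + k) []) := by
  intro fuel
  induction fuel with
  | zero => omega
  | succ fuel ih =>
    intro idx k hk hgood hbad
    rw [pvLoopA]
    by_cases hq : idx ≥ 1 ∧ String.ofList (pvEncA idx []) ∉ xs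
    · rw [if_pos hq]
      match k with
      | 0 => rfl
      | k + 1 => exact absurd hq (by simpa using hbad 0 (by omega))
    · rw [if_neg hq]
      match k with
      | 0 => exact absurd (by simpa using hgood) hq
      | k + 1 =>
        have hgood' : (idx + 1) + k ≥ 1 ∧ String.ofList (pvEncA ((idx + 1) + k) []) ∉ xs := by
          have h : idx + 1 + k = idx + (k + 1) := by omega
          rw [h]; exact hgood
        have hbad' : ∀ j < k, ¬ ((idx + 1) + j ≥ 1 ∧ String.ofList (pvEncA ((idx + 1) + j) []) ∉ xs) := by
          intro j hj
          have h : idx + 1 + j = idx + (j + 1) := by omega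
          rw [h]; exact hbad _ (by omega)
        have := ih (idx + 1) k (by omega) hgood' hbad'
        rw [this]
        congr 2
        omega

-- ===== VERDICT (by name: the statement is the Claim_ definition above) =====
theorem next_suffix_py_spec : Claim_equal_next_suffix_py := by
  intro xs _
  unfold Spec_next_suffix_py next_suffix_py
  -- characterise B's sweep result r
  set used := pvUsed xs with hused
  set l := PySem.List.sorted used (fun x => x) false with hl
  have hperm : l.Perm used := PySem.List.sorted_perm used (fun x => x) false
  have hpw : l.Pairwise (· ≤ ·) := by
    simpa using PySem.List.sorted_pairwise (xs := used) (key := fun x => x)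
  have hnd : l.Nodup := hperm.nodup_iff.mpr (pvUsed_nodup xs)
  have hlt : l.Pairwise (· < ·) := by
    refine (hpw.and hnd).imp ?_
    rintro a b ⟨h1, h2⟩
    exact lt_of_le_of_ne h1 h2
  set r := l.foldl (fun v u => if u = v then v + 1 else v) 2 with hr
  obtain ⟨hout, hge, hin⟩ := pvSweep l hlt 2
  rw [← hr] at hout hge hin
  have hmeml : ∀ v, v ∈ l ↔ v ∈ used := fun v => hperm.mem_iff
  -- r is the least value ≥ 2 outside used
  have hout' : r ∉ used := fun hc => hout ((hmeml r).mpr hc)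
  have hin' : ∀ j, 2 ≤ j → j < r → j ∈ used := fun j h1 h2 => (hmeml j).mp (hin j h1 h2)
  -- A's loop: it stops at index r - 1 (suffix pvE r)
  have hK : r ≤ xs.length + 2 := by
    -- [2, r) injects into used, so r - 2 ≤ used.length ≤ xs.length
    have hsub : ((List.range (r - 2)).map (fun k => 2 + k)) ⊆ used := by
      intro v hv
      simp only [List.mem_map, List.mem_range] at hv
      obtain ⟨k, hk, rfl⟩ := hv
      exact hin' _ (by omega) (by omega)
    have hnd2 : ((List.range (r - 2)).map (fun k => 2 + k)).Nodup :=
      (List.nodup_range).map (fun a b hab => by omega)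
    have hlen := (List.subperm_of_subset hnd2 hsub).length_le
    simp only [List.length_map, List.length_range] at hlen
    have hused_len : used.length ≤ xs.length := by
      rw [hused, pvUsed]
      suffices h : ∀ (ys : List String) (u : PySem.Set Nat),
          (ys.foldl (fun u s => if pvValidB s then PySem.Set.add u (s.toList.foldl pvDecStep 0) else u) u).length ≤
            u.length + ys.length by
        simpa using h xs []
      intro ys
      induction ys with
      | nil => simp
      | cons s ys ih =>
        intro u
        simp only [List.foldl_cons, List.length_cons]
        split
        · have h1 := ih (PySem.Set.add u (s.toList.foldl pvDecStep 0))
          have h2 : (PySem.Set.add u (s.toList.foldl pvDecStep 0)).length ≤ u.length + 1 := by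
            simp only [PySem.Set.add]
            split
            · omega
            · simp
          omega
        · have := ih u; omega
    omega
  have hQ : ∀ idx : Nat, (idx ≥ 1 ∧ String.ofList (pvEncA idx []) ∉ xs) ↔ (idx ≥ 1 ∧ (idx + 1) ∉ used) := by
    intro idx
    rw [pvEncA_eq, List.append_nil]
    constructor
    · rintro ⟨h1, h2⟩
      exact ⟨h1, fun hc => h2 ((pvMem_used xs (idx + 1) (by omega)).mpr hc)⟩
    · rintro ⟨h1, h2⟩
      exact ⟨h1, fun hc => h2 ((pvMem_used xs (idx + 1) (by omega)).mp hc)⟩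
  have hA : pvLoopA (xs.length + 2) 0 xs = String.ofList (pvEncA (0 + (r - 1)) []) := by
    refine pvLoopA_eq xs (xs.length + 2) 0 (r - 1) (by omega) ?_ ?_
    · rw [hQ]
      refine ⟨by omega, ?_⟩
      have h : 0 + (r - 1) + 1 = r := by omega
      rw [h]
      exact hout'
    · intro j hj
      rw [hQ]
      rintro ⟨h1, h2⟩
      exact h2 (hin' (0 + j + 1) (by omega) (by omega))
  rw [hA, pvEncA_eq, List.append_nil]
  show String.ofList (pvE (0 + (r - 1) + 1)) = next_suffix_py_alt xs
  have hBdef : next_suffix_py_alt xs = String.ofList (pvEnc2 r) := rfl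
  rw [hBdef, pvEnc2_eq r (by omega)]
  have h : 0 + (r - 1) + 1 = r := by omega
  rw [h]
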